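-- pv_equiv track=rewrite | github.com/buckstrdr/00-trading-project | 02-strategy-creation/pdh-pdl-strategy/src/core/risk_manager.py | _symbols_correlated
-- ===== SOURCE A (Python) =====
-- def _symbols_correlated(symbol1: str, symbol2: str) -> bool:
--     """Check if two symbols are correlated."""
--     correlation_groups = [
--         ['ES', 'MES', 'SPY'],
--         ['NQ', 'MNQ', 'QQQ'],
--         ['RTY', 'M2K', 'IWM']
--     ]
--
--     for group in correlation_groups:
--         if symbol1 in group and symbol2 in group:
--             return True
--
--     return False
-- ===== SOURCE B (Python) =====
-- def _symbols_correlated(symbol1: str, symbol2: str) -> bool: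
--     """Check if two symbols are correlated."""
--     correlation_groups = [
--         ['ES', 'MES', 'SPY'],
--         ['NQ', 'MNQ', 'QQQ'],
--         ['RTY', 'M2K', 'IWM']
--     ]
--     group_of = {s: i for i, g in enumerate(correlation_groups) for s in g}
--     g1 = group_of.get(symbol1)
--     return g1 is not None and g1 == group_of.get(symbol2)
-- ===== Notes on version B (the rewrite author's own statement) =====
-- stated objective: idiomatic
-- what changed: B precomputes a symbol-to-group-id dictionary (dict comprehension over enumerated groups) and answers with two lookups, replacing A's per-group double membership scan.
import Mathlib
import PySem

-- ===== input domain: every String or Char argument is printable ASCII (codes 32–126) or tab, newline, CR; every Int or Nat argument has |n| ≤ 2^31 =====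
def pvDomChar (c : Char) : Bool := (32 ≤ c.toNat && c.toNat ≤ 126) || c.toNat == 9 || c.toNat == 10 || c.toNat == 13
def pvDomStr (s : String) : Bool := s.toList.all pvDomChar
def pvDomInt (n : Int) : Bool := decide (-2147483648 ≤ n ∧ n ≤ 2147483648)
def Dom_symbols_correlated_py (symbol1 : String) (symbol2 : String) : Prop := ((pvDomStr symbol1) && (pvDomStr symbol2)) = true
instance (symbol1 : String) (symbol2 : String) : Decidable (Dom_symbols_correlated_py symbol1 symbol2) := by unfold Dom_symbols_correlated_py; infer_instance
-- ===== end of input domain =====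

-- B replaces A's per-group membership scan by a precomputed symbol→group-id dictionary and two lookups (idiomatic; return value only).

-- ===== PORT A =====
-- the for-loop over correlation_groups, returning True on the first group containing both
def symsCorrLoop (groups : List (List String)) (symbol1 : String) (symbol2 : String) : Bool :=
  match groups with
  | [] => false
  | g :: rest =>
      if g.contains symbol1 && g.contains symbol2 then true
      else symsCorrLoop rest symbol1 symbol2

def symbols_correlated_py (symbol1 : String) (symbol2 : String) : Bool :=
  let correlation_groups : List (List String) :=
    [["ES", "MES", "SPY"], ["NQ", "MNQ", "QQQ"], ["RTY", "M2K", "IWM"]]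
  symsCorrLoop correlation_groups symbol1 symbol2

-- ===== PORT B =====
-- {s: i for i, g in enumerate(correlation_groups) for s in g}
def symsGroupOf (groups : List (List String)) : PySem.Dict String Int :=
  (PySem.List.enumerate groups).foldl
    (fun d p => p.2.foldl (fun d s => d.insert s p.1) d) PySem.Dict.empty

def symbols_correlated_py_alt (symbol1 : String) (symbol2 : String) : Bool :=
  let correlation_groups : List (List String) :=
    [["ES", "MES", "SPY"], ["NQ", "MNQ", "QQQ"], ["RTY", "M2K", "IWM"]]
  let group_of := symsGroupOf correlation_groups
  match group_of.get? symbol1 with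
  | none => false
  | some g1 => some g1 == group_of.get? symbol2

-- ===== PRECONDITION & SPEC =====
def Spec_symbols_correlated_py (symbol1 : String) (symbol2 : String) (out : Bool) : Prop := out = symbols_correlated_py_alt symbol1 symbol2
instance (symbol1 : String) (symbol2 : String) (out : Bool) : Decidable (Spec_symbols_correlated_py symbol1 symbol2 out) := by unfold Spec_symbols_correlated_py; infer_instance

-- ===== CLAIM (what is proved, stated in full; the proofs are below) =====
def Claim_equal_symbols_correlated_py : Prop := ∀ (symbol1 : String) (symbol2 : String), Dom_symbols_correlated_py symbol1 symbol2 → Spec_symbols_correlated_py symbol1 symbol2 (symbols_correlated_py symbol1 symbol2)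

-- ===== LEMMAS AND PROOFS =====

-- ===== VERDICT (by name: the statement is the Claim_ definition above) =====
lemma pvFindNone (s : String)
    (h : ¬s = "ES" ∧ ¬s = "MES" ∧ ¬s = "SPY" ∧ ¬s = "NQ" ∧ ¬s = "MNQ" ∧
         ¬s = "QQQ" ∧ ¬s = "RTY" ∧ ¬s = "M2K" ∧ ¬s = "IWM") :
    List.find? (fun p => p.1 == s)
      [("ES", (0 : Int)), ("MES", 0), ("SPY", 0), ("NQ", 1), ("MNQ", 1), ("QQQ", 1),
       ("RTY", 2), ("M2K", 2), ("IWM", 2)] = none := by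
  rw [List.find?_eq_none]
  intro p hp
  obtain ⟨h1, h2, h3, h4, h5, h6, h7, h8, h9⟩ := h
  fin_cases hp <;> simp only [beq_iff_eq] <;> rintro rfl <;> simp_all

set_option maxHeartbeats 2000000 in
theorem symbols_correlated_py_spec : Claim_equal_symbols_correlated_py := by
  intro s1 s2 _
  unfold Spec_symbols_correlated_py symbols_correlated_py symbols_correlated_py_alt
  have key : ∀ s : String, s = "ES" ∨ s = "MES" ∨ s = "SPY" ∨ s = "NQ" ∨ s = "MNQ" ∨
      s = "QQQ" ∨ s = "RTY" ∨ s = "M2K" ∨ s = "IWM" ∨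
      (s ∉ (["ES","MES","SPY","NQ","MNQ","QQQ","RTY","M2K","IWM"] : List String)) := by
    intro s
    by_cases h : s ∈ (["ES","MES","SPY","NQ","MNQ","QQQ","RTY","M2K","IWM"] : List String)
    · simp only [List.mem_cons, List.not_mem_nil, or_false] at h; tauto
    · tauto
  rcases key s1 with h1|h1|h1|h1|h1|h1|h1|h1|h1|h1 <;>
    rcases key s2 with h2|h2|h2|h2|h2|h2|h2|h2|h2|h2 <;>
    simp_all [symsCorrLoop, symsGroupOf, PySem.List.enumerate,
      PySem.Dict.insert, PySem.Dict.empty, PySem.Dict.get?] <;>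
    first
      | tauto
      | (rw [pvFindNone _ h1]; rfl)
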